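-- pv_equiv track=rewrite | github.com/ahmedsaeedsaid/OCR-Arabic | sigmentation_helps.py | count_spaces_connected
-- ===== SOURCE A (Python) =====
-- def count_spaces_connected(list):
--     count_spaces=[]
--     count=0
--     if list[0]==0 :
--         flag=False
--     else:
--         flag=True
--
--     for value in list :
--         if value==0 and flag:
--             count+=1
--         elif value!=0 and not flag :
--             flag=True
--         elif count!=0:
--             count_spaces.append(count)
--             count=0
--     return count_spaces
-- ===== SOURCE B (Python) =====
-- def count_spaces_connected(list):
--     # Run-length encode the input by "is zero", then keep the lengths of the
--     # interior zero-runs (every run except the first and last is interior).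
--     runs = []           # finished runs as (is_zero, length)
--     cur = None          # current open run
--     for x in list:
--         z = (x == 0)
--         if cur is None:
--             cur = (z, 1)
--         elif cur[0] == z:
--             cur = (z, cur[1] + 1)
--         else:
--             runs.append(cur)
--             cur = (z, 1)
--     if cur is not None:
--         runs.append(cur)
--     return [n for z, n in runs[1:-1] if z]
-- ===== Notes on version B (the rewrite author's own statement) =====
-- stated objective: simpler
-- what changed: Replaces A's per-element count/flag state machine with a run-length encoding pass followed by 'keep the lengths of the zero-runs strictly between the first and last run'.
import Mathlib
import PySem

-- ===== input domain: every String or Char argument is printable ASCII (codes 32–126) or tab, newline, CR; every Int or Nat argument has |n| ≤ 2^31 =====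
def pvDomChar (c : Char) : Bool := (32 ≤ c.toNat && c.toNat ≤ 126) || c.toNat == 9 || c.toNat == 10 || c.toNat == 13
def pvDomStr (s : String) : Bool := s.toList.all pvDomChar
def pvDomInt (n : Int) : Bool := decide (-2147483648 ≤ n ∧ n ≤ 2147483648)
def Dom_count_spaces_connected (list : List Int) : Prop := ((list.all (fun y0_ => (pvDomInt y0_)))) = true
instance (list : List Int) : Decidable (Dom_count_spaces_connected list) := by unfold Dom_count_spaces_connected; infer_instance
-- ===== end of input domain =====

-- B replaces A's count/flag state machine by a run-length encoding pass plus a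
-- filter of the interior zero-runs (objective: simpler); equal on all nonempty lists.

-- ===== PORT A =====
-- the for-loop's body, state = (count_spaces, count, flag)
def cscStepA (s : List Int × Int × Bool) (value : Int) : List Int × Int × Bool :=
  if value == 0 && s.2.2 then (s.1, s.2.1 + 1, s.2.2)
  else if value != 0 && !s.2.2 then (s.1, s.2.1, true)
  else if s.2.1 ≠ 0 then (s.1 ++ [s.2.1], 0, s.2.2)
  else s

def count_spaces_connected (list : List Int) : List Int :=
  match PySem.List.pyGet? list 0 with
  | none => []   -- IndexError on the empty input; excluded by Pre_
  | some h =>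
    let flag0 : Bool := !(h == 0)
    (list.foldl cscStepA ([], 0, flag0)).1

-- ===== PORT B =====
-- Source B's loop body: state = (runs, cur)
def cscStepB (s : List (Bool × Int) × Option (Bool × Int)) (x : Int) :
    List (Bool × Int) × Option (Bool × Int) :=
  let z : Bool := x == 0
  match s.2 with
  | none => (s.1, some (z, 1))
  | some (b, n) => if b == z then (s.1, some (z, n + 1)) else (s.1 ++ [(b, n)], some (z, 1))

def count_spaces_connected_alt (list : List Int) : List Int :=
  let st := list.foldl cscStepB ([], none)
  let runs := match st.2 with
    | none => st.1
    | some cur => st.1 ++ [cur]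
  ((PySem.List.slice runs (some 1) (some (-1))).filter (fun r => r.1)).map (fun r => r.2)

-- ===== PRECONDITION & SPEC =====
-- A subscripts the first element, so it raises IndexError exactly on the empty list.
def Pre_count_spaces_connected (list : List Int) : Prop := list ≠ []
instance (list : List Int) : Decidable (Pre_count_spaces_connected list) := by
  unfold Pre_count_spaces_connected; infer_instance

def pvWitness_count_spaces_connected : List Int := [1, 0, 0, 2, 0, 3]

def Spec_count_spaces_connected (list : List Int) (out : List Int) : Prop :=
  out = count_spaces_connected_alt list
instance (list : List Int) (out : List Int) : Decidable (Spec_count_spaces_connected list out) := by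
  unfold Spec_count_spaces_connected; infer_instance

-- ===== CLAIM (what is proved, stated in full; the proofs are below) =====
def Claim_equal_count_spaces_connected : Prop := ∀ (list : List Int), Dom_count_spaces_connected list → Pre_count_spaces_connected list → Spec_count_spaces_connected list (count_spaces_connected list)

-- ===== LEMMAS AND PROOFS =====

-- the selected output read off a run list: zero-run lengths, skipping the first run
def cscSel (runs : List (Bool × Int)) : List Int :=
  ((runs.drop 1).filter (fun r => r.1)).map (fun r => r.2)

lemma csc_slice_snoc {α : Type} (l : List α) (x : α) :
    PySem.List.slice (l ++ [x]) (some 1) (some (-1)) = l.drop 1 := by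
  rcases l with _ | ⟨a, t⟩
  · simp [PySem.List.slice, PySem.List.clampIdx]
  · simp [PySem.List.slice, PySem.List.clampIdx]
    rw [if_neg (by omega)]
    simp

lemma cscSel_snoc (runs : List (Bool × Int)) (r : Bool × Int) (h : runs ≠ []) :
    cscSel (runs ++ [r]) = cscSel runs ++ (if r.1 then [r.2] else []) := by
  rcases runs with _ | ⟨a, t⟩
  · exact absurd rfl h
  · simp only [cscSel, List.cons_append, List.drop_one, List.tail_cons,
      List.filter_append, List.map_append]
    congr 1
    rcases r with ⟨b, m⟩
    cases b <;> simp

lemma stepA_zero_noflag (acc : List Int) (x : Int) (hx : x = 0) :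
    cscStepA (acc, 0, false) x = (acc, 0, false) := by subst hx; simp [cscStepA]
lemma stepA_zero_flag (acc : List Int) (c : Int) (x : Int) (hx : x = 0) :
    cscStepA (acc, c, true) x = (acc, c + 1, true) := by subst hx; simp [cscStepA]
lemma stepA_nonzero_noflag (acc : List Int) (c : Int) (x : Int) (hx : ¬ x = 0) :
    cscStepA (acc, c, false) x = (acc, c, true) := by simp [cscStepA, hx]
lemma stepA_nonzero_flag_pos (acc : List Int) (c : Int) (x : Int) (hx : ¬ x = 0) (hc : c ≠ 0) :
    cscStepA (acc, c, true) x = (acc ++ [c], 0, true) := by simp [cscStepA, hx, hc]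
lemma stepA_nonzero_flag_zero (acc : List Int) (c : Int) (x : Int) (hx : ¬ x = 0) (hc : c = 0) :
    cscStepA (acc, c, true) x = (acc, c, true) := by simp [cscStepA, hx, hc]
lemma stepB_zero_zrun (runs : List (Bool × Int)) (n x : Int) (hx : x = 0) :
    cscStepB (runs, some (true, n)) x = (runs, some (true, n + 1)) := by
  subst hx; simp [cscStepB]
lemma stepB_nonzero_zrun (runs : List (Bool × Int)) (n x : Int) (hx : ¬ x = 0) :
    cscStepB (runs, some (true, n)) x = (runs ++ [(true, n)], some (false, 1)) := by
  simp [cscStepB, hx]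
lemma stepB_zero_nzrun (runs : List (Bool × Int)) (n x : Int) (hx : x = 0) :
    cscStepB (runs, some (false, n)) x = (runs ++ [(false, n)], some (true, 1)) := by
  subst hx; simp [cscStepB]
lemma stepB_nonzero_nzrun (runs : List (Bool × Int)) (n x : Int) (hx : ¬ x = 0) :
    cscStepB (runs, some (false, n)) x = (runs, some (false, n + 1)) := by
  simp [cscStepB, hx]

lemma csc_some (xs : List Int) : ∀ (runs : List (Bool × Int)) (z : Bool) (n : Int),
    ∃ b m, (xs.foldl cscStepB (runs, some (z, n))).2 = some (b, m) := by
  induction xs with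
  | nil => intro runs z n; exact ⟨z, n, rfl⟩
  | cons x t ih =>
    intro runs z n
    simp only [List.foldl_cons, cscStepB]
    by_cases h : z == (x == 0)
    · rw [if_pos h]; exact ih _ _ _
    · rw [if_neg h]; exact ih _ _ _

lemma csc_inv (xs : List Int) : ∀ (acc : List Int) (c : Int) (flag : Bool)
    (runs : List (Bool × Int)) (z : Bool) (n : Int), 1 ≤ n →
    ((flag = false ∧ c = 0 ∧ runs = [] ∧ acc = [] ∧ z = true)
      ∨ (flag = true ∧ z = false ∧ c = 0 ∧ acc = cscSel runs)
      ∨ (flag = true ∧ z = true ∧ c = n ∧ runs ≠ [] ∧ acc = cscSel runs)) →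
    (xs.foldl cscStepA (acc, c, flag)).1 =
      cscSel (xs.foldl cscStepB (runs, some (z, n))).1 := by
  induction xs with
  | nil =>
    intro acc c flag runs z n hn hcase
    simp only [List.foldl_nil]
    rcases hcase with ⟨_, _, hr, ha, _⟩ | ⟨_, _, _, ha⟩ | ⟨_, _, _, _, ha⟩
    · subst hr ha; simp [cscSel]
    · exact ha
    · exact ha
  | cons x t ih =>
    intro acc c flag runs z n hn hcase
    simp only [List.foldl_cons]
    by_cases hx : x = 0
    · rcases hcase with ⟨hf, hc, hr, ha, hz⟩ | ⟨hf, hz, hc, ha⟩ | ⟨hf, hz, hc, hr, ha⟩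
      · -- leading zeros: both sides idle / extend the open zero run
        subst hf hc hr ha hz
        rw [stepA_zero_noflag _ _ hx, stepB_zero_zrun _ _ _ hx]
        exact ih _ _ _ _ _ _ (by omega) (Or.inl ⟨rfl, rfl, rfl, rfl, rfl⟩)
      · -- a zero after a nonzero run: A starts counting, B flushes and opens a zero run
        subst hf hz hc
        rw [stepA_zero_flag _ _ _ hx, stepB_zero_nzrun _ _ _ hx]
        rcases List.eq_nil_or_concat' runs with hr | ⟨l, r, hr⟩
        · subst hr
          refine ih _ _ _ _ _ _ (by omega) (Or.inr (Or.inr ⟨rfl, rfl, rfl, by simp, ?_⟩))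
          simp [ha, cscSel]
        · refine ih _ _ _ _ _ _ (by omega) (Or.inr (Or.inr ⟨rfl, rfl, rfl, by simp [hr], ?_⟩))
          rw [ha, cscSel_snoc _ _ (by simp [hr])]
          simp
      · -- extend the current zero run
        subst hf hz
        rw [stepA_zero_flag _ _ _ hx, stepB_zero_zrun _ _ _ hx]
        exact ih _ _ _ _ _ _ (by omega) (Or.inr (Or.inr ⟨rfl, rfl, by omega, hr, ha⟩))
    · rcases hcase with ⟨hf, hc, hr, ha, hz⟩ | ⟨hf, hz, hc, ha⟩ | ⟨hf, hz, hc, hr, ha⟩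
      · -- first nonzero: A's flag flips on, B flushes the leading zero run
        subst hf hc hr ha hz
        rw [stepA_nonzero_noflag _ _ _ hx, stepB_nonzero_zrun _ _ _ hx]
        exact ih _ _ _ _ _ _ (by omega) (Or.inr (Or.inl ⟨rfl, rfl, rfl, by simp [cscSel]⟩))
      · -- extend the current nonzero run
        subst hf hz hc
        rw [stepA_nonzero_flag_zero _ _ _ hx rfl, stepB_nonzero_nzrun _ _ _ hx]
        exact ih _ _ _ _ _ _ (by omega) (Or.inr (Or.inl ⟨rfl, rfl, rfl, ha⟩))
      · -- close a zero run: A appends the count, B flushes the zero run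
        subst hf hz hc
        rw [stepA_nonzero_flag_pos _ _ _ hx (by omega), stepB_nonzero_zrun _ _ _ hx]
        refine ih _ _ _ _ _ _ (by omega) (Or.inr (Or.inl ⟨rfl, rfl, rfl, ?_⟩))
        rw [ha, cscSel_snoc _ _ hr]
        simp

theorem count_spaces_connected_spec : Claim_equal_count_spaces_connected := by
  intro list _ hpre
  unfold Spec_count_spaces_connected
  rcases list with _ | ⟨x, t⟩
  · exact absurd rfl hpre
  · unfold count_spaces_connected count_spaces_connected_alt
    have hA : PySem.List.pyGet? (x :: t) (0 : Int) = some x := by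
      simp [PySem.List.pyGet?, PySem.List.pyIdx?]
    rw [hA]
    simp only [List.foldl_cons]
    have hstep : cscStepB ([], none) x = ([], some (x == 0, 1)) := rfl
    rw [hstep]
    obtain ⟨b, m, hcur⟩ := csc_some t [] (x == 0) 1
    rw [hcur]
    rw [csc_slice_snoc]
    by_cases hx : x = 0
    · have hz : (x == 0) = true := by simp [hx]
      rw [hz]
      simp only [Bool.not_true]
      rw [stepA_zero_noflag _ _ hx]
      have := csc_inv t [] 0 false [] true 1 (by omega) (Or.inl ⟨rfl, rfl, rfl, rfl, rfl⟩)
      simpa [cscSel] using this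
    · have hz : (x == 0) = false := by simp [hx]
      rw [hz]
      simp only [Bool.not_false]
      rw [stepA_nonzero_flag_zero _ _ _ hx rfl]
      have := csc_inv t [] 0 true [] false 1 (by omega)
        (Or.inr (Or.inl ⟨rfl, rfl, rfl, by simp [cscSel]⟩))
      simpa [cscSel] using this
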